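-- pv_equiv track=rewrite | github.com/GuiOliveira78/EngWeb2024 | TPC3/conversor.py | calc_generos
-- ===== SOURCE A (Python) =====
-- def pertenceGeneros(valor, lista):
--     encontrado = False
--     i = 0
--     while i < len(lista) and not encontrado:
--         if lista[i]['genero'] == valor:
--             encontrado = True
--         i += 1
--     return encontrado
--
-- def calc_generos(bd):
--     generos = []
--     id_gen = 0
--     for reg in bd:
--         if 'genres' in reg:
--             for gen in reg['genres']:
--                 if not pertenceGeneros(gen, generos) and gen != '':
--                     generos.append({
--                         'idGen' : f"{id_gen}",
--                         'genero' : gen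
--                     })
--                     id_gen += 1
--     return generos
-- ===== SOURCE B (Python) =====
-- def calc_generos(bd):
--     # stage 1: flatten all non-empty genres from records that have 'genres'
--     flat = [g for reg in bd if 'genres' in reg for g in reg['genres'] if g != '']
--     # stage 2: ordered dedup by repeated elimination: take the head, then
--     # strike every later occurrence of it out of the remainder (no membership test)
--     uniq = []
--     while flat:
--         h = flat[0]
--         uniq.append(h)
--         flat = [g for g in flat[1:] if g != h]
--     # stage 3: attach sequential ids
--     return [{'idGen': f"{i}", 'genero': g} for i, g in enumerate(uniq)]
-- ===== Notes on version B (the rewrite author's own statement) =====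
-- stated objective: alternative
-- what changed: Replaces A's single-pass accumulate-with-linear-membership-scan loop by three stages: flatten all non-empty genres, dedupe by repeated head-extraction that filters every later occurrence of the head out of the remaining list (no membership test at all), then enumerate the unique sequence to attach ids.
import Mathlib
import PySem

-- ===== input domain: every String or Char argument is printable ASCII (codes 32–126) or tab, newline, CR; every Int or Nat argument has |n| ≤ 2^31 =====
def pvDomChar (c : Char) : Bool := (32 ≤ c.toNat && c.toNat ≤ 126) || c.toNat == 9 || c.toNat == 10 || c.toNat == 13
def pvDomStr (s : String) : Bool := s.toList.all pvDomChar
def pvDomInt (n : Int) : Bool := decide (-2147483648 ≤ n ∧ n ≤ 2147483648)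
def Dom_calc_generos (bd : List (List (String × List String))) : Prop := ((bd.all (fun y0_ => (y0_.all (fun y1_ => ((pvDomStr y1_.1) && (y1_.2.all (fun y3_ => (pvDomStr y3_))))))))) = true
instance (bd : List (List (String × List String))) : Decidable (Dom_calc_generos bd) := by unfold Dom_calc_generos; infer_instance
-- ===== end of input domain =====

-- B replaces A's accumulate-with-membership-scan loop by flatten → dedup by repeated head-extraction-and-filter → enumerate: an alternative staged decomposition.


-- ===== PORT A =====
-- 'while i < len(lista) and not encontrado' scan: stops at the first dict whose 'genero' equals valor
def pertenceGeneros (valor : String) (lista : List (List (String × String))) : Bool :=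
  match lista with
  | [] => false
  | d :: rest =>
    if (PySem.Dict.mk d).get? "genero" == some valor then true
    else pertenceGeneros valor rest

def calcGenStep (st : List (List (String × String)) × Int) (gen : String) :
    List (List (String × String)) × Int :=
  if !pertenceGeneros gen st.1 && gen != "" then
    (st.1 ++ [[("idGen", PySem.Int.toStr st.2), ("genero", gen)]], st.2 + 1)
  else st

def calc_generos (bd : List (List (String × List String))) : List (List (String × String)) :=
  (bd.foldl (fun st reg =>
      match (PySem.Dict.mk reg).get? "genres" with
      | some gens => gens.foldl calcGenStep st
      | none => st) ([], 0)).1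

-- ===== PORT B =====
-- the 'while flat: take head, filter it out of the tail' dedup loop of Source B
def uniqFilter : List String → List String
  | [] => []
  | x :: xs => x :: uniqFilter (xs.filter (fun g => g ≠ x))
termination_by xs => xs.length
decreasing_by
  simp only [List.length_cons, List.length_unattach]
  exact Nat.lt_succ_of_le (le_trans (List.length_filter_le _ _) (by simp))

def calc_generos_alt (bd : List (List (String × List String))) : List (List (String × String)) :=
  let flat := bd.flatMap (fun reg =>
    match (PySem.Dict.mk reg).get? "genres" with
    | some gens => gens.filter (fun g => g ≠ "")
    | none => [])
  (PySem.List.enumerate (uniqFilter flat)).map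
    (fun p => [("idGen", PySem.Int.toStr p.1), ("genero", p.2)])

-- ===== PRECONDITION & SPEC =====
def Spec_calc_generos (bd : List (List (String × List String))) (out : List (List (String × String))) : Prop := out = calc_generos_alt bd
instance (bd : List (List (String × List String))) (out : List (List (String × String))) : Decidable (Spec_calc_generos bd out) := by unfold Spec_calc_generos; infer_instance

-- ===== CLAIM (what is proved, stated in full; the proofs are below) =====
def Claim_equal_calc_generos : Prop := ∀ (bd : List (List (String × List String))), Dom_calc_generos bd → Spec_calc_generos bd (calc_generos bd)

-- ===== LEMMAS AND PROOFS =====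

-- the output list A maintains, parameterised by the distinct genres seen so far
def outOf (seen : List String) : List (List (String × String)) :=
  (PySem.List.enumerate seen).map (fun p => [("idGen", PySem.Int.toStr p.1), ("genero", p.2)])

theorem pertence_outOf (valor : String) (seen : List String) (s : Int) :
    pertenceGeneros valor ((PySem.List.enumerate seen s).map
      (fun p => [("idGen", PySem.Int.toStr p.1), ("genero", p.2)])) = decide (valor ∈ seen) := by
  induction seen generalizing s with
  | nil => simp [PySem.List.enumerate, pertenceGeneros]
  | cons x xs ih =>
    simp only [PySem.List.enumerate_cons, List.map_cons, pertenceGeneros]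
    rw [ih]
    by_cases h : x = valor
    · simp [h, PySem.Dict.get?_mk_cons]
    · simp [PySem.Dict.get?_mk_cons, h, Ne.symm h]

theorem step_invariant (gen : String) (seen : List String) (hg : gen ≠ "") :
    calcGenStep (outOf seen, (seen.length : Int)) gen =
      (outOf (PySem.Set.add seen gen), ((PySem.Set.add seen gen).length : Int)) := by
  unfold calcGenStep outOf
  by_cases h : gen ∈ seen
  · simp [pertence_outOf, h]
  · rw [PySem.Set.add_of_not_mem h]
    simp [pertence_outOf, h, hg, PySem.List.enumerate_append, PySem.List.enumerate]

theorem fold_invariant (gs : List String) (seen : List String) :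
    gs.foldl calcGenStep (outOf seen, (seen.length : Int)) =
      (outOf ((gs.filter (fun g => g ≠ "")).foldl PySem.Set.add seen),
       (((gs.filter (fun g => g ≠ "")).foldl PySem.Set.add seen).length : Int)) := by
  induction gs generalizing seen with
  | nil => simp
  | cons g gs ih =>
    by_cases hg : g = ""
    · subst hg
      have h1 : calcGenStep (outOf seen, (seen.length : Int)) "" = (outOf seen, (seen.length : Int)) := by
        simp [calcGenStep]
      rw [List.foldl_cons, h1, ih]
      simp
    · simp only [List.foldl_cons, List.filter_cons]
      rw [step_invariant g seen hg, ih]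
      simp [hg]

theorem main_fold (bd : List (List (String × List String))) (seen : List String) :
    bd.foldl (fun st reg =>
        match (PySem.Dict.mk reg).get? "genres" with
        | some gens => gens.foldl calcGenStep st
        | none => st) (outOf seen, (seen.length : Int)) =
      (outOf ((bd.flatMap (fun reg =>
          match (PySem.Dict.mk reg).get? "genres" with
          | some gens => gens.filter (fun g => g ≠ "")
          | none => [])).foldl PySem.Set.add seen),
       (((bd.flatMap (fun reg =>
          match (PySem.Dict.mk reg).get? "genres" with
          | some gens => gens.filter (fun g => g ≠ "")
          | none => [])).foldl PySem.Set.add seen).length : Int)) := by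
  induction bd generalizing seen with
  | nil => simp
  | cons reg bd ih =>
    cases h : (PySem.Dict.mk reg).get? "genres" with
    | none =>
      simp only [List.foldl_cons, List.flatMap_cons, h, List.nil_append]
      exact ih seen
    | some gens =>
      simp only [List.foldl_cons, List.flatMap_cons, h, List.foldl_append]
      rw [fold_invariant gens seen, ih]

-- the seen-set fold computes exactly Source B's head-extract-and-filter dedup
theorem foldl_add_eq_uniqFilter (xs : List String) (seen : List String) :
    xs.foldl PySem.Set.add seen = seen ++ uniqFilter (xs.filter (fun g => g ∉ seen)) := by
  induction hn : xs.length using Nat.strong_induction_on generalizing xs seen with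
  | _ n ih =>
    cases xs with
    | nil => simp [uniqFilter]
    | cons x xs =>
      by_cases hx : x ∈ seen
      · have := ih xs.length (by simp [← hn]) xs seen rfl
        simp only [List.foldl_cons, List.filter_cons, hx]
        rw [PySem.Set.add_of_mem hx]
        simpa using this
      · have hrec := ih xs.length (by simp [← hn]) xs (seen ++ [x]) rfl
        have hfe : ((xs.filter (fun g => g ∉ seen)).filter (fun g => g ≠ x))
            = xs.filter (fun g => g ∉ seen ++ [x]) := by
          rw [List.filter_filter]
          apply List.filter_congr
          intro a _
          simp [List.mem_append, and_comm]
        rw [List.foldl_cons, PySem.Set.add_of_not_mem hx, hrec, ← hfe,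
            List.filter_cons_of_pos (by simp [hx]), uniqFilter]
        simp

-- ===== VERDICT (by name: the statement is the Claim_ definition above) =====
theorem calc_generos_spec : Claim_equal_calc_generos := by
  intro bd _
  unfold Spec_calc_generos calc_generos calc_generos_alt
  have h0 : (([], (0 : Int)) : List (List (String × String)) × Int) = (outOf [], ((List.length ([] : List String)) : Int)) := by
    simp [outOf, PySem.List.enumerate]
  rw [h0, main_fold bd []]
  rw [foldl_add_eq_uniqFilter _ []]
  simp [outOf]
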